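-- pv_equiv track=rewrite | github.com/TallChris91/CACAPO-Dataset | Statistics/Statistics_Corpus.py | ProdigyUniqueMRs
-- ===== SOURCE A (Python) =====
-- def ProdigyUniqueMRs(domaindata):
--     mrlist = []
--     filterlist = ['text', 'textidx', 'paragraphidx', 'lineidx']
--     for text in domaindata:
--         for paragraph in text:
--             for sentencedict in paragraph:
--                 newsentencedict = {k: v for k, v in sentencedict.items() if k not in filterlist}
--                 mrlist.append(newsentencedict)
--
--     newmrlist = [i for n, i in enumerate(mrlist) if i not in mrlist[n + 1:]]
--     return newmrlist
-- ===== SOURCE B (Python) =====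
-- def ProdigyUniqueMRs(domaindata):
--     drop = {'text', 'textidx', 'paragraphidx', 'lineidx'}
--     mrlist = [{k: v for k, v in sentencedict.items() if k not in drop}
--               for text in domaindata for paragraph in text for sentencedict in paragraph]
--     out = []
--     for d in reversed(mrlist):
--         if d not in out:
--             out.append(d)
--     out.reverse()
--     return out
-- ===== Notes on version B (the rewrite author's own statement) =====
-- stated objective: alternative
-- what changed: A dedups by testing each filtered dict for membership in the whole remaining suffix (a fresh slice per element); B instead makes one backward pass, appending each dict not already in the accumulated unique output and reversing at the end, so each element is compared only against the distinct dicts seen so far.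
import Mathlib
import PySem

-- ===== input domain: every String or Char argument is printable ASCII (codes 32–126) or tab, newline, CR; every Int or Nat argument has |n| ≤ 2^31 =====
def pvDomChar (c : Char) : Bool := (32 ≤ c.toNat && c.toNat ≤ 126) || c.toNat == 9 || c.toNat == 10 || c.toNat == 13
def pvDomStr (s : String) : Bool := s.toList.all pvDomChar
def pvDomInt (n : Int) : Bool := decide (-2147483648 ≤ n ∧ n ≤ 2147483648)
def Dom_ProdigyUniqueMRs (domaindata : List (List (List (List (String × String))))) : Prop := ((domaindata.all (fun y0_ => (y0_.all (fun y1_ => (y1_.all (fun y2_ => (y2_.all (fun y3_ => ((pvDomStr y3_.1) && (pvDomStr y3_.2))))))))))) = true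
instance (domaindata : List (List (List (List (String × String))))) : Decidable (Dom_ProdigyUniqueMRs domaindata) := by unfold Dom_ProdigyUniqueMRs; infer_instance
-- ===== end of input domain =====

-- B replaces A's per-element scan of the remaining suffix (O(n^2) slices) by one backward pass that
-- keeps the first occurrence seen from the end (= A's last occurrence) against the accumulated output.

-- ===== PORT A =====
-- Python dict lookup on an items list: first matching key (dict keys are unique, so exact).
def pvGetFirst : List (String × String) → String → Option String
  | [], _ => none
  | (k, v) :: rest, key => if k == key then some v else pvGetFirst rest key

-- Python's 'd1 == d2' on dicts (order-insensitive: same keys, same values) — exact for unique-key items lists.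
def pvDictEq (d1 d2 : List (String × String)) : Bool :=
  (d1.map Prod.fst ++ d2.map Prod.fst).all (fun k => pvGetFirst d1 k == pvGetFirst d2 k)

-- Python's 'd in l' for a list of dicts.
def pvMemEq (d : List (String × String)) (l : List (List (String × String))) : Bool :=
  l.any (fun e => pvDictEq d e)

-- '[i for n, i in enumerate(mrlist) if i not in mrlist[n + 1:]]': keep i iff absent from its suffix.
def aSuffixDedup : List (List (String × String)) → List (List (String × String))
  | [] => []
  | i :: rest => if pvMemEq i rest then aSuffixDedup rest else i :: aSuffixDedup rest

def ProdigyUniqueMRs (domaindata : List (List (List (List (String × String))))) : List (List (String × String)) :=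
  let filterlist := ["text", "textidx", "paragraphidx", "lineidx"]
  let mrlist := domaindata.foldl (fun mrlist text =>
    text.foldl (fun mrlist paragraph =>
      paragraph.foldl (fun mrlist sentencedict =>
        mrlist ++ [sentencedict.filter (fun kv => !(filterlist.contains kv.1))]) mrlist) mrlist) []
  aSuffixDedup mrlist

-- ===== PORT B =====
def ProdigyUniqueMRs_alt (domaindata : List (List (List (List (String × String))))) : List (List (String × String)) :=
  let drop := ["text", "textidx", "paragraphidx", "lineidx"]
  let mrlist := domaindata.flatMap (fun text => text.flatMap (fun paragraph =>
    paragraph.map (fun sentencedict => sentencedict.filter (fun kv => !(drop.contains kv.1)))))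
  (mrlist.reverse.foldl (fun out d => if pvMemEq d out then out else out ++ [d]) []).reverse

-- ===== PRECONDITION & SPEC =====
def Spec_ProdigyUniqueMRs (domaindata : List (List (List (List (String × String))))) (out : List (List (String × String))) : Prop := out = ProdigyUniqueMRs_alt domaindata
instance (domaindata : List (List (List (List (String × String))))) (out : List (List (String × String))) : Decidable (Spec_ProdigyUniqueMRs domaindata out) := by unfold Spec_ProdigyUniqueMRs; infer_instance

-- ===== CLAIM (what is proved, stated in full; the proofs are below) =====
def Claim_equal_ProdigyUniqueMRs : Prop := ∀ (domaindata : List (List (List (List (String × String))))), Dom_ProdigyUniqueMRs domaindata → Spec_ProdigyUniqueMRs domaindata (ProdigyUniqueMRs domaindata)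

-- ===== LEMMAS AND PROOFS =====

theorem pvGetFirst_eq_none (d : List (String × String)) (k : String)
    (h : k ∉ d.map Prod.fst) : pvGetFirst d k = none := by
  induction d with
  | nil => rfl
  | cons p rest ih =>
    obtain ⟨a, b⟩ := p
    simp only [List.map_cons, List.mem_cons, not_or] at h
    show (if a == k then some b else pvGetFirst rest k) = none
    have hne : ¬ (a == k) = true := by
      simp only [beq_iff_eq]
      exact fun hh => h.1 hh.symm
    rw [if_neg hne, ih h.2]

theorem pvDictEq_iff (d1 d2 : List (String × String)) :
    pvDictEq d1 d2 = true ↔ ∀ k, pvGetFirst d1 k = pvGetFirst d2 k := by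
  unfold pvDictEq
  rw [List.all_eq_true]
  constructor
  · intro h k
    by_cases hk : k ∈ d1.map Prod.fst ++ d2.map Prod.fst
    · simpa using h k hk
    · simp only [List.mem_append, not_or] at hk
      rw [pvGetFirst_eq_none d1 k hk.1, pvGetFirst_eq_none d2 k hk.2]
  · intro h k _
    simp [h k]

theorem pvDictEq_trans {a b c : List (String × String)}
    (h1 : pvDictEq a b = true) (h2 : pvDictEq b c = true) : pvDictEq a c = true := by
  rw [pvDictEq_iff] at *
  exact fun k => (h1 k).trans (h2 k)

theorem pvMemEq_iff (d : List (String × String)) (l : List (List (String × String))) :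
    pvMemEq d l = true ↔ ∃ e ∈ l, pvDictEq d e = true := by
  unfold pvMemEq; rw [List.any_eq_true]

-- membership-up-to-dict-equality is preserved by the suffix dedup
theorem pvMemEq_aSuffixDedup (x : List (String × String)) :
    ∀ xs, pvMemEq x (aSuffixDedup xs) = pvMemEq x xs := by
  intro xs
  induction xs with
  | nil => rfl
  | cons y ys ih =>
    by_cases hy : pvMemEq y ys = true
    · rw [aSuffixDedup, if_pos hy, ih]
      have hexp : pvMemEq x (y :: ys) = (pvDictEq x y || pvMemEq x ys) := by
        simp [pvMemEq]
      rw [hexp]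
      cases hxy : pvDictEq x y
      · simp
      · simp only [Bool.true_or]
        obtain ⟨e, he, hye⟩ := (pvMemEq_iff y ys).mp hy
        exact (pvMemEq_iff x ys).mpr ⟨e, he, pvDictEq_trans hxy hye⟩
    · rw [aSuffixDedup, if_neg hy]
      simp [pvMemEq, List.any_cons] at ih ⊢
      rw [ih]

-- B's backward pass, reversed, is exactly A's suffix-based dedup
theorem revpass_eq_aSuffixDedup :
    ∀ l : List (List (String × String)),
      (l.reverse.foldl (fun out d => if pvMemEq d out then out else out ++ [d]) []).reverse
        = aSuffixDedup l := by
  intro l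
  induction l with
  | nil => rfl
  | cons x xs ih =>
    rw [List.reverse_cons, List.foldl_append]
    simp only [List.foldl_cons, List.foldl_nil]
    generalize hR : (List.foldl (fun out d => if pvMemEq d out then out else out ++ [d]) [] xs.reverse) = R at ih ⊢
    have hmem : pvMemEq x R = pvMemEq x xs := by
      have h1 : pvMemEq x R = pvMemEq x R.reverse := by
        unfold pvMemEq; rw [List.any_reverse]
      rw [h1, ih, pvMemEq_aSuffixDedup]
    rw [hmem, aSuffixDedup]
    split_ifs with h
    · exact ih
    · rw [List.reverse_append, List.reverse_singleton, List.singleton_append, ih]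

-- the triple foldl build equals flatMap/flatMap/map
theorem build1 {δ β : Type} (f : δ → β) :
    ∀ (p : List δ) (acc : List β), p.foldl (fun m s => m ++ [f s]) acc = acc ++ p.map f := by
  intro p
  induction p with
  | nil => simp
  | cons s rest ih => intro acc; simp [ih]

theorem build2 {δ β : Type} (f : δ → β) :
    ∀ (t : List (List δ)) (acc : List β),
      t.foldl (fun m p => p.foldl (fun m s => m ++ [f s]) m) acc
        = acc ++ t.flatMap (fun p => p.map f) := by
  intro t
  induction t with
  | nil => simp
  | cons p rest ih =>
    intro acc
    rw [List.foldl_cons, build1 f p acc, ih, List.flatMap_cons, List.append_assoc]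

theorem build3 {δ β : Type} (f : δ → β) :
    ∀ (dd : List (List (List δ))) (acc : List β),
      dd.foldl (fun m t => t.foldl (fun m p => p.foldl (fun m s => m ++ [f s]) m) m) acc
        = acc ++ dd.flatMap (fun t => t.flatMap (fun p => p.map f)) := by
  intro dd
  induction dd with
  | nil => simp
  | cons t rest ih =>
    intro acc
    rw [List.foldl_cons, build2 f t acc, ih, List.flatMap_cons, List.append_assoc]

-- ===== VERDICT (by name: the statement is the Claim_ definition above) =====
theorem ProdigyUniqueMRs_spec : Claim_equal_ProdigyUniqueMRs := by
  intro dd _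
  show ProdigyUniqueMRs dd = ProdigyUniqueMRs_alt dd
  simp only [ProdigyUniqueMRs, ProdigyUniqueMRs_alt]
  rw [build3, List.nil_append, revpass_eq_aSuffixDedup]
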